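-- pv_equiv track=rewrite | github.com/PanOscar/MaturaInf | Maturka/nowa/próbna/liczby odkryte.py | odkryte
-- ===== SOURCE A (Python) =====
-- def odkryte(n):
--     tekst = str(n)
--     dl = len(tekst)
--     log = True
--     for i in range(dl):
--         if int(tekst[i]) == 0:
--             continue
--         if n % int(tekst[i]) != 0:
--             return False
--     return log
-- ===== SOURCE B (Python) =====
-- def odkryte(n):
--     # Fold the nonzero digits of str(n) into a single lcm, then test divisibility once.
--     l = 1
--     for ch in str(n):
--         d = int(ch)
--         if d == 0:
--             continue
--         g, x = l, d
--         while x != 0: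
--             g, x = x, g % x
--         l = l // g * d
--     return n % l == 0
-- ===== Notes on version B (the rewrite author's own statement) =====
-- stated objective: alternative
-- what changed: Instead of A's per-digit modulo scan with early return, B folds the nonzero digits into a single least common multiple (Euclid's gcd) and performs one divisibility test n % lcm == 0.
import Mathlib
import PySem

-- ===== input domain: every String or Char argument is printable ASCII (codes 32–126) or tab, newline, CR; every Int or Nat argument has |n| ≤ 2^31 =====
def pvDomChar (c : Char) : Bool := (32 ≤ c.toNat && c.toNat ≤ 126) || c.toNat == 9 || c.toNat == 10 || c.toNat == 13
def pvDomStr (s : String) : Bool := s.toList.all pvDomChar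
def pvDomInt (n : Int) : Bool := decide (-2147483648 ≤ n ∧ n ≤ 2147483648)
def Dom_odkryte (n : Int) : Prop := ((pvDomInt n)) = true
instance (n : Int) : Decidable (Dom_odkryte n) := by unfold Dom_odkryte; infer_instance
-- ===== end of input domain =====

-- B replaces A's per-digit modulo scan by folding the nonzero digits into one lcm and testing n % lcm == 0 once (objective: alternative).

-- ===== PORT A =====
-- the for-loop over str(n), with early return False; int(tekst[i]) is
-- PySem.Int.ofChars? [c]; the .getD 0 arm is only reached where Python raises
-- ValueError (excluded by Pre_odkryte)
def odkryteGo (n : Int) : List Char → Bool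
  | [] => true                                  -- return log  (log is True throughout)
  | c :: rest =>
    let d := (PySem.Int.ofChars? [c]).getD 0
    if d = 0 then odkryteGo n rest              -- continue
    else if PySem.Int.mod n d ≠ 0 then false    -- return False
    else odkryteGo n rest

def odkryte (n : Int) : Bool :=
  odkryteGo n (PySem.Int.toChars n)

-- ===== PORT B =====
-- Euclid's loop 'g, x = l, d; while x != 0: g, x = x, g % x' from Source B.
-- Here x starts at a nonzero digit and PySem.Int.mod keeps it nonnegative, so
-- along every real execution 'x != 0' coincides with '0 < x', which is the
-- decreasing guard.
def gcdLoop (g x : Int) : Int :=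
  if _h : 0 < x then gcdLoop x (PySem.Int.mod g x)
  else g
termination_by x.toNat
decreasing_by
  have h2 := PySem.Int.mod_lt g _h
  omega

-- the for-loop of Source B accumulating l = l // g * d over the nonzero digits
def odkryteAltGo (l : Int) : List Char → Int
  | [] => l
  | c :: rest =>
    let d := (PySem.Int.ofChars? [c]).getD 0
    if d = 0 then odkryteAltGo l rest
    else odkryteAltGo (PySem.Int.floordiv l (gcdLoop l d) * d) rest

def odkryte_alt (n : Int) : Bool :=
  PySem.Int.mod n (odkryteAltGo 1 (PySem.Int.toChars n)) = 0

-- ===== PRECONDITION & SPEC =====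
-- Pre_ excludes n < 0, where Python's int('-') raises ValueError in A (and in B).
def Pre_odkryte (n : Int) : Prop := 0 ≤ n
instance (n : Int) : Decidable (Pre_odkryte n) := by unfold Pre_odkryte; infer_instance
def pvWitness_odkryte : Int := 12

def Spec_odkryte (n : Int) (out : Bool) : Prop := out = odkryte_alt n
instance (n : Int) (out : Bool) : Decidable (Spec_odkryte n out) := by unfold Spec_odkryte; infer_instance

-- ===== CLAIM (what is proved, stated in full; the proofs are below) =====
def Claim_equal_odkryte : Prop := ∀ (n : Int), Dom_odkryte n → Pre_odkryte n → Spec_odkryte n (odkryte n)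

-- ===== LEMMAS AND PROOFS =====

-- int(c) for a single character never parses to a negative value
theorem ofChars_single_nonneg (c : Char) (d : Int)
    (h : PySem.Int.ofChars? [c] = some d) : 0 ≤ d := by
  by_cases hm : c = '-'
  · subst hm
    have : PySem.Int.ofChars? ['-'] = none := by decide
    rw [this] at h; exact absurd h (by simp)
  · unfold PySem.Int.ofChars? at h
    simp [List.dropWhile] at h
    by_cases hs : PySem.Int.isIntSpace c = true
    · simp [hs, Option.bind_eq_some_iff] at h
      obtain ⟨a, -, ha⟩ := h; omega
    · simp [hs] at h
      split at h
      next ds heq => simp_all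
      next => rw [Option.bind_eq_some_iff] at h; obtain ⟨a, -, ha⟩ := h; simp at ha; omega
      next => rw [Option.bind_eq_some_iff] at h; obtain ⟨a, -, ha⟩ := h; simp at ha; omega

theorem dig_nonneg (c : Char) : 0 ≤ (PySem.Int.ofChars? [c]).getD 0 := by
  cases h : PySem.Int.ofChars? [c] with
  | none => simp
  | some d => simpa using ofChars_single_nonneg c d h

-- Euclid's loop computes Int.gcd on nonnegative inputs
theorem gcdLoop_eq (g x : Int) (hx : 0 < x) :
    gcdLoop g x = Int.gcd g x := by
  rw [gcdLoop, dif_pos hx]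
  have _h1 := PySem.Int.mod_nonneg g hx
  have _h2 := PySem.Int.mod_lt g hx
  by_cases hz : PySem.Int.mod g x = 0
  · rw [gcdLoop, hz, dif_neg (by omega)]
    have hdvd : x ∣ g := (PySem.Int.mod_eq_zero_iff_dvd g x).mp hz
    have hm0 : g % x = 0 := Int.emod_eq_zero_of_dvd hdvd
    rw [← Int.gcd_emod g x, hm0]
    simp [Int.natAbs_of_nonneg (le_of_lt hx)]
  · rw [gcdLoop_eq x (PySem.Int.mod g x) (by omega)]
    rw [PySem.Int.mod_eq_emod_of_pos hx, Int.gcd_comm, Int.gcd_emod]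
termination_by x.toNat
decreasing_by
  have _h1 := PySem.Int.mod_nonneg g hx
  have _h2 := PySem.Int.mod_lt g hx
  omega

-- one lcm step: l // gcd(l,d) * d is ≥ 1 and divides exactly the common multiples
theorem lcmStep (l d : Int) (hl : 1 ≤ l) (hd : 1 ≤ d) :
    1 ≤ PySem.Int.floordiv l (gcdLoop l d) * d ∧
    ∀ m : Int, PySem.Int.floordiv l (gcdLoop l d) * d ∣ m ↔ (l ∣ m ∧ d ∣ m) := by
  have hgl : gcdLoop l d = Int.gcd l d := gcdLoop_eq l d (by omega)
  have hGpos : 0 < (Int.gcd l d : Int) := by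
    have : 0 < Int.gcd l d := Int.gcd_pos_iff.mpr (Or.inl (by omega))
    exact_mod_cast this
  have hGdl : (Int.gcd l d : Int) ∣ l := Int.gcd_dvd_left l d
  have hfd : PySem.Int.floordiv l (gcdLoop l d) = l / (Int.gcd l d : Int) := by
    rw [hgl, PySem.Int.floordiv_eq_ediv_of_pos hGpos]
  have hLG : (l / (Int.gcd l d : Int) * d) * (Int.gcd l d : Int) = l * d := by
    rw [mul_right_comm, Int.ediv_mul_cancel hGdl]
  have hlcmG : ((Int.lcm l d : Int)) * (Int.gcd l d : Int) = l * d := by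
    have h := Int.gcd_mul_lcm l d
    have hln : (l.natAbs : Int) = l := Int.natAbs_of_nonneg (by omega)
    have hdn : (d.natAbs : Int) = d := Int.natAbs_of_nonneg (by omega)
    have hnat : Int.lcm l d * Int.gcd l d = l.natAbs * d.natAbs := by
      rw [Nat.mul_comm]; exact h
    calc ((Int.lcm l d : Int)) * (Int.gcd l d : Int)
        = ((Int.lcm l d * Int.gcd l d : Nat) : Int) := by push_cast; ring
      _ = ((l.natAbs * d.natAbs : Nat) : Int) := by rw [hnat]
      _ = l * d := by push_cast; rw [abs_of_nonneg (by omega : (0:Int) ≤ l), abs_of_nonneg (by omega : (0:Int) ≤ d)]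
  have hLlcm : l / (Int.gcd l d : Int) * d = (Int.lcm l d : Int) :=
    mul_right_cancel₀ (by omega) (hLG.trans hlcmG.symm)
  rw [hfd, hLlcm]
  constructor
  · have : 0 < Int.lcm l d := Int.lcm_pos (by omega) (by omega)
    exact_mod_cast this
  · intro m
    constructor
    · intro h
      exact ⟨dvd_trans (Int.dvd_lcm_left l d) h, dvd_trans (Int.dvd_lcm_right l d) h⟩
    · rintro ⟨h1, h2⟩
      exact Int.coe_lcm_dvd h1 h2

-- the accumulator always divides the final lcm, which stays ≥ 1
theorem altGo_inv (cs : List Char) : ∀ l : Int, 1 ≤ l →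
    1 ≤ odkryteAltGo l cs ∧ l ∣ odkryteAltGo l cs := by
  induction cs with
  | nil => intro l hl; simpa [odkryteAltGo] using hl
  | cons c rest ih =>
    intro l hl
    rw [odkryteAltGo]
    by_cases hd : (PySem.Int.ofChars? [c]).getD 0 = 0
    · simpa [hd] using ih l hl
    · have hd1 : 1 ≤ (PySem.Int.ofChars? [c]).getD 0 := by
        have := dig_nonneg c; omega
      obtain ⟨hL1, hLdvd⟩ := lcmStep l _ hl hd1
      obtain ⟨h1, h2⟩ := ih _ hL1
      refine ⟨by simpa [hd] using h1, ?_⟩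
      simp only [hd, if_false]
      exact dvd_trans ((hLdvd _).mp dvd_rfl).1 h2

-- the central correspondence between the two loops
theorem go_iff (n : Int) (cs : List Char) : ∀ l : Int, 1 ≤ l →
    ((odkryteGo n cs = true ∧ l ∣ n) ↔ odkryteAltGo l cs ∣ n) := by
  induction cs with
  | nil => intro l hl; simp [odkryteGo, odkryteAltGo]
  | cons c rest ih =>
    intro l hl
    rw [odkryteGo, odkryteAltGo]
    by_cases hd : (PySem.Int.ofChars? [c]).getD 0 = 0
    · simpa [hd] using ih l hl
    · have hd1 : 1 ≤ (PySem.Int.ofChars? [c]).getD 0 := by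
        have := dig_nonneg c; omega
      obtain ⟨hL1, hLdvd⟩ := lcmStep l _ hl hd1
      simp only [hd, if_false]
      by_cases hdvd : (PySem.Int.ofChars? [c]).getD 0 ∣ n
      · have hm : PySem.Int.mod n ((PySem.Int.ofChars? [c]).getD 0) = 0 :=
          (PySem.Int.mod_eq_zero_iff_dvd _ _).mpr hdvd
        rw [if_neg (not_not.mpr hm)]
        rw [← ih _ hL1, hLdvd n]
        tauto
      · have hm : PySem.Int.mod n ((PySem.Int.ofChars? [c]).getD 0) ≠ 0 := by
          intro h; exact hdvd ((PySem.Int.mod_eq_zero_iff_dvd _ _).mp h)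
        rw [if_pos hm]
        simp only [Bool.false_eq_true, false_and, false_iff]
        intro hcon
        have := dvd_trans (altGo_inv rest _ hL1).2 hcon
        exact hdvd ((hLdvd n).mp this).2

-- ===== VERDICT (by name: the statement is the Claim_ definition above) =====
theorem odkryte_spec : Claim_equal_odkryte := by
  intro n _ _
  unfold Spec_odkryte odkryte odkryte_alt
  have h := go_iff n (PySem.Int.toChars n) 1 le_rfl
  simp only [one_dvd, and_true] at h
  have hinv := altGo_inv (PySem.Int.toChars n) 1 le_rfl
  have hmod : (PySem.Int.mod n (odkryteAltGo 1 (PySem.Int.toChars n)) = 0) ↔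
      odkryteAltGo 1 (PySem.Int.toChars n) ∣ n :=
    PySem.Int.mod_eq_zero_iff_dvd _ _
  cases hA : odkryteGo n (PySem.Int.toChars n) with
  | true => simp [hmod, ← h, hA]
  | false =>
    have : ¬ odkryteAltGo 1 (PySem.Int.toChars n) ∣ n := by
      rw [← h, hA]; simp
    simp [hmod, this]
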